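-- pv_equiv track=rewrite | github.com/xiaolongjia/techTrees | Python/98_授课/Algorithm development/01_String/11_How do you check if two strings are a rotation of each other/rotation_check.py | check
-- ===== SOURCE A (Python) =====
-- def check(strA, strB):
--     if len(strA) != len(strB):
--         return False
--     for start in range(len(strA)):
--         end = len(strA) - 1 - start
--         if strA[start] != strB[end]:
--             return False
--     return True
-- ===== SOURCE B (Python) =====
-- def check(strA, strB):
--     return strA == strB[::-1]
-- ===== Notes on version B (the rewrite author's own statement) =====
-- stated objective: idiomatic
-- what changed: Replaced the explicit length guard and index loop with a single slice-reverse and direct string equality.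
import Mathlib
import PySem

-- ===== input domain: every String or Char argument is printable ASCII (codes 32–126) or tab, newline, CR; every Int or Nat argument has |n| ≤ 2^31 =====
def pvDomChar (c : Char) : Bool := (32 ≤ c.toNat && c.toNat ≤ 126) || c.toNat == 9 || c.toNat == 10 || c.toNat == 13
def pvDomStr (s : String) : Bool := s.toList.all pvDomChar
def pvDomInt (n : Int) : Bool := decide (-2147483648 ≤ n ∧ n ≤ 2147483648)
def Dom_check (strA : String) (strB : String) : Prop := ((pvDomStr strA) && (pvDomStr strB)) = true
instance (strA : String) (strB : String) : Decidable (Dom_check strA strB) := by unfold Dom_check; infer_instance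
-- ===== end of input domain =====

-- B replaces A's length guard and index loop with one slice-reverse and a direct equality (idiomatic).

-- ===== PORT A =====
-- the index loop of A: for start in range(len(strA)): end = len-1-start; if strA[start] != strB[end]: return False
-- (both indices are always in range when the loop runs, so pyGet? is some; .getD ' ' is never the fallback)
def checkLoop (a b : List Char) : List Int → Bool
  | [] => true
  | start :: rest =>
    let e : Int := (a.length : Int) - 1 - start
    if (PySem.List.pyGet? a start).getD ' ' ≠ (PySem.List.pyGet? b e).getD ' ' then false
    else checkLoop a b rest

def check (strA : String) (strB : String) : Bool :=
  if strA.toList.length ≠ strB.toList.length then false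
  else checkLoop strA.toList strB.toList (PySem.List.pyRange 0 (strA.toList.length) 1)

-- ===== PORT B =====
-- return strA == strB[::-1]
def check_alt (strA : String) (strB : String) : Bool :=
  strA.toList == (PySem.List.slice? strB.toList none none (-1)).getD []

-- ===== PRECONDITION & SPEC =====
def Spec_check (strA : String) (strB : String) (out : Bool) : Prop := out = check_alt strA strB
instance (strA : String) (strB : String) (out : Bool) : Decidable (Spec_check strA strB out) := by unfold Spec_check; infer_instance

-- ===== CLAIM (what is proved, stated in full; the proofs are below) =====
def Claim_equal_check : Prop := ∀ (strA : String) (strB : String), Dom_check strA strB → Spec_check strA strB (check strA strB)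

-- ===== LEMMAS AND PROOFS =====

-- the loop over a suffix of range(n) returns true iff every remaining index agrees
theorem checkLoop_eq_all (a b : List Char) (l : List Int) :
    checkLoop a b l =
      l.all (fun start =>
        (PySem.List.pyGet? a start).getD ' ' == (PySem.List.pyGet? b ((a.length : Int) - 1 - start)).getD ' ') := by
  induction l with
  | nil => rfl
  | cons x rest ih =>
    simp only [checkLoop, List.all_cons, ih]
    by_cases h : (PySem.List.pyGet? a x).getD ' ' = (PySem.List.pyGet? b ((a.length : Int) - 1 - x)).getD ' '
    · simp [h]
    · simp [h]

theorem check_eq_reverse (a b : List Char) (hlen : a.length = b.length) :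
    checkLoop a b (PySem.List.pyRange 0 (a.length) 1) = (a == b.reverse) := by
  rw [checkLoop_eq_all]
  rcases Bool.eq_false_or_eq_true (a == b.reverse) with hrev | hrev
  · rw [hrev]
    rw [List.all_eq_true]
    have hab : a = b.reverse := by simpa using hrev
    intro x hx
    rw [PySem.List.mem_pyRange_one] at hx
    obtain ⟨h0, hlt⟩ := hx
    obtain ⟨i, rfl⟩ : ∃ i : Nat, x = (i : Int) := ⟨x.toNat, by omega⟩
    have hi : i < a.length := by omega
    have h1 : PySem.List.pyGet? a (i : Int) = some (a[i]) := by
      simp [PySem.List.pyGet?, PySem.List.pyIdx?, hi]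
    have h2 : (a.length : Int) - 1 - (i : Int) = ((a.length - 1 - i : Nat) : Int) := by omega
    have hj : a.length - 1 - i < b.length := by omega
    have h3 : PySem.List.pyGet? b ((a.length : Int) - 1 - (i : Int)) = some (b[a.length - 1 - i]) := by
      rw [h2]; simp [hj]
    rw [h1, h3]
    simp only [Option.getD_some, beq_iff_eq]
    rw [List.getElem_of_eq hab, List.getElem_reverse]
    congr 1
    omega
  · -- reverse unequal: some index disagrees
    rw [hrev]
    rw [List.all_eq_false]
    have hne : a ≠ b.reverse := by
      intro h; rw [h] at hrev; simp at hrev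
    -- find a disagreeing index
    have hlen' : a.length = b.reverse.length := by simp [hlen]
    have : ¬ (∀ i : Nat, (h : i < a.length) → a[i] = b.reverse[i]'(by omega)) := by
      intro hall
      exact hne (List.ext_getElem hlen' (fun i h1 h2 => hall i h1))
    push Not at this
    obtain ⟨i, hi, hne2⟩ := this
    refine ⟨(i : Int), ?_, ?_⟩
    · rw [PySem.List.mem_pyRange_one]; omega
    · rw [Bool.not_eq_true, beq_eq_false_iff_ne]
      have h1 : PySem.List.pyGet? a (i : Int) = some (a[i]) := by
        simp [PySem.List.pyGet?, PySem.List.pyIdx?, hi]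
      have h2 : (a.length : Int) - 1 - (i : Int) = ((a.length - 1 - i : Nat) : Int) := by omega
      have hj : a.length - 1 - i < b.length := by omega
      have h3 : PySem.List.pyGet? b ((a.length : Int) - 1 - (i : Int)) = some (b[a.length - 1 - i]) := by
        rw [h2]; simp [hj]
      rw [h1, h3]
      simp only [Option.getD_some, ne_eq]
      intro hEq
      apply hne2
      rw [List.getElem_reverse]
      simp only [hlen] at hEq
      exact hEq

-- ===== VERDICT (by name: the statement is the Claim_ definition above) =====
theorem check_spec : Claim_equal_check := by
  intro strA strB _
  unfold Spec_check check check_alt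
  rw [PySem.List.slice?_none_none_neg_one]
  simp only [Option.getD_some]
  by_cases hlen : strA.toList.length = strB.toList.length
  · simp only [hlen, ne_eq, not_true_eq_false, ite_false]
    have := check_eq_reverse strA.toList strB.toList hlen
    simpa [hlen] using this
  · simp only [ne_eq, hlen, not_false_eq_true, if_pos]
    symm
    rw [beq_eq_false_iff_ne]
    intro h
    apply hlen
    rw [h]; simp
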